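-- pv_equiv track=rewrite | github.com/KietCSE/dp-dfl | topology/random_graph.py | create_regular_graph
-- ===== SOURCE A (Python) =====
-- from typing import Dict, Set
--
-- def create_regular_graph(n_nodes: int, n_neighbors: int, seed: int = 42) -> Dict[int, Set[int]]:
--     """
--     Create a deterministic N-regular undirected graph.
--
--     Every node has exactly n_neighbors neighbors (degree = n_neighbors).
--     Uses circular lattice: node i connects to i±1, i±2, ..., i±(n_neighbors//2).
--
--     Requires n_neighbors to be even (for undirected regularity) and < n_nodes.
--     Same (n_nodes, n_neighbors) always produces the same graph regardless of seed.
--     """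
--     if n_neighbors >= n_nodes:
--         raise ValueError(
--             f"n_neighbors ({n_neighbors}) must be < n_nodes ({n_nodes})"
--         )
--     if (n_nodes * n_neighbors) % 2 != 0:
--         raise ValueError(
--             f"n_nodes * n_neighbors must be even, got {n_nodes} * {n_neighbors} = {n_nodes * n_neighbors}. "
--             f"Either n_nodes or n_neighbors must be even."
--         )
--
--     graph: Dict[int, Set[int]] = {i: set() for i in range(n_nodes)}
--     half = n_neighbors // 2
--
--     # Circular lattice: node i connects to i±1, i±2, ..., i±half
--     for i in range(n_nodes):
--         for k in range(1, half + 1):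
--             j = (i + k) % n_nodes
--             graph[i].add(j)
--             graph[j].add(i)
--
--     # Odd degree: connect node i to node i + n_nodes//2 (diametrically opposite)
--     if n_neighbors % 2 != 0:
--         for i in range(n_nodes // 2):
--             j = i + n_nodes // 2
--             graph[i].add(j)
--             graph[j].add(i)
--
--     return graph
-- ===== SOURCE B (Python) =====
-- from typing import Dict, Set
--
-- def create_regular_graph(n_nodes: int, n_neighbors: int, seed: int = 42) -> Dict[int, Set[int]]:
--     """Node-centric construction: each node's neighbor set is computed
--     independently as a union of (at most) four index intervals, with no
--     mutation of other nodes' sets."""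
--     if n_neighbors >= n_nodes:
--         raise ValueError(
--             f"n_neighbors ({n_neighbors}) must be < n_nodes ({n_nodes})"
--         )
--     if (n_nodes * n_neighbors) % 2 != 0:
--         raise ValueError(
--             f"n_nodes * n_neighbors must be even, got {n_nodes} * {n_neighbors} = {n_nodes * n_neighbors}. "
--             f"Either n_nodes or n_neighbors must be even."
--         )
--
--     half = n_neighbors // 2
--     graph: Dict[int, Set[int]] = {}
--     for i in range(n_nodes):
--         segments = (
--             range(max(0, i - half), i),                    # lower lattice neighbors
--             range(i + 1, min(i + half + 1, n_nodes)),      # upper lattice neighbors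
--             range(0, i + half + 1 - n_nodes),              # upper neighbors that wrap past n-1
--             range(n_nodes + i - half, n_nodes),            # lower neighbors that wrap past 0
--         )
--         nbrs = {j for seg in segments for j in seg}
--         if n_neighbors % 2 != 0:
--             nbrs.add((i + n_nodes // 2) % n_nodes)         # diametric neighbor (n_nodes is even here)
--         graph[i] = nbrs
--     return graph
-- ===== Notes on version B (the rewrite author's own statement) =====
-- stated objective: alternative
-- what changed: A builds the graph edge-centrically, double-writing every edge into a mutable dict of sets (graph[i].add(j); graph[j].add(i)); B computes each node's neighbor set independently in closed form as a union of at most four index intervals (plus the diametric neighbor for odd degree), never touching another node's set.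
import Mathlib
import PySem

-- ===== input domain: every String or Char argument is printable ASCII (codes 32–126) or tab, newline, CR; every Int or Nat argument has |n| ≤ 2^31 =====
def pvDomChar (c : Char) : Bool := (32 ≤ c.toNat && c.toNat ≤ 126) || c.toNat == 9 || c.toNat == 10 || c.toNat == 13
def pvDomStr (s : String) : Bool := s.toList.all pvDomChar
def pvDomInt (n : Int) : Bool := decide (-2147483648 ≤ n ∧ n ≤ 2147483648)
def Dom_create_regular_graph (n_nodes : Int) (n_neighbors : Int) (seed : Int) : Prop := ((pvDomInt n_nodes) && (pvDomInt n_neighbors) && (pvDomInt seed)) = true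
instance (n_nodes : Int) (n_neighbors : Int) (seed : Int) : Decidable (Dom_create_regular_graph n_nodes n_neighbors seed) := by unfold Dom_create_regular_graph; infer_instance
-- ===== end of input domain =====

-- B replaces A's edge-centric double-write into a mutable dict of sets by a node-centric
-- construction: each node's neighbor set is a union of at most four index intervals
-- (plus the diametric neighbor for odd degree), computed independently per node.

-- ===== PORT A =====
def create_regular_graph (n_nodes : Int) (n_neighbors : Int) (seed : Int) : List (Int × List Int) :=
  if n_neighbors ≥ n_nodes then []                                -- Python: raise ValueError (excluded by Pre_)
  else if PySem.Int.mod (n_nodes * n_neighbors) 2 ≠ 0 then []     -- Python: raise ValueError (excluded by Pre_)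
  else
    let graph : PySem.Dict Int (PySem.Set Int) :=
      (PySem.List.pyRange 0 n_nodes).foldl (fun d i => d.insert i PySem.Set.empty) PySem.Dict.empty
    let half := PySem.Int.floordiv n_neighbors 2
    let graph :=
      (PySem.List.pyRange 0 n_nodes).foldl (fun g i =>
        (PySem.List.pyRange 1 (half + 1)).foldl (fun g k =>
          let j := PySem.Int.mod (i + k) n_nodes
          let g := g.modify i PySem.Set.empty (fun s => PySem.Set.add s j)   -- graph[i].add(j)
          g.modify j PySem.Set.empty (fun s => PySem.Set.add s i)) g) graph  -- graph[j].add(i)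
    let graph :=
      if PySem.Int.mod n_neighbors 2 ≠ 0 then
        (PySem.List.pyRange 0 (PySem.Int.floordiv n_nodes 2)).foldl (fun g i =>
          let j := i + PySem.Int.floordiv n_nodes 2
          let g := g.modify i PySem.Set.empty (fun s => PySem.Set.add s j)
          g.modify j PySem.Set.empty (fun s => PySem.Set.add s i)) graph
      else graph
    graph.items

-- ===== PORT B =====
def create_regular_graph_alt (n_nodes : Int) (n_neighbors : Int) (seed : Int) : List (Int × List Int) :=
  if n_neighbors ≥ n_nodes then []                                -- Python: raise ValueError (excluded by Pre_)
  else if PySem.Int.mod (n_nodes * n_neighbors) 2 ≠ 0 then []     -- Python: raise ValueError (excluded by Pre_)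
  else
    let half := PySem.Int.floordiv n_neighbors 2
    let graph : PySem.Dict Int (PySem.Set Int) :=
      (PySem.List.pyRange 0 n_nodes).foldl (fun d i =>
        let nbrs := PySem.Set.ofList
          (PySem.List.pyRange (max 0 (i - half)) i
            ++ PySem.List.pyRange (i + 1) (min (i + half + 1) n_nodes)
            ++ PySem.List.pyRange 0 (i + half + 1 - n_nodes)
            ++ PySem.List.pyRange (n_nodes + i - half) n_nodes)
        let nbrs :=
          if PySem.Int.mod n_neighbors 2 ≠ 0 then
            PySem.Set.add nbrs (PySem.Int.mod (i + PySem.Int.floordiv n_nodes 2) n_nodes)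
          else nbrs
        d.insert i nbrs) PySem.Dict.empty
    graph.items

-- ===== PRECONDITION & SPEC =====
-- Pre_ excludes exactly the inputs on which A raises ValueError:
-- n_neighbors ≥ n_nodes, or n_nodes * n_neighbors odd.
def Pre_create_regular_graph (n_nodes : Int) (n_neighbors : Int) (seed : Int) : Prop :=
  n_neighbors < n_nodes ∧ PySem.Int.mod (n_nodes * n_neighbors) 2 = 0
instance (n_nodes : Int) (n_neighbors : Int) (seed : Int) : Decidable (Pre_create_regular_graph n_nodes n_neighbors seed) := by unfold Pre_create_regular_graph; infer_instance
def pvWitness_create_regular_graph : Int × Int × Int := (6, 3, 42)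

def Spec_create_regular_graph (n_nodes : Int) (n_neighbors : Int) (seed : Int) (out : List (Int × List Int)) : Prop := out = create_regular_graph_alt n_nodes n_neighbors seed
instance (n_nodes : Int) (n_neighbors : Int) (seed : Int) (out : List (Int × List Int)) : Decidable (Spec_create_regular_graph n_nodes n_neighbors seed out) := by unfold Spec_create_regular_graph; infer_instance

-- ===== CLAIM (what is proved, stated in full; the proofs are below) =====
def Claim_equal_create_regular_graph : Prop := ∀ (n_nodes : Int) (n_neighbors : Int) (seed : Int), Dom_create_regular_graph n_nodes n_neighbors seed → Pre_create_regular_graph n_nodes n_neighbors seed → Spec_create_regular_graph n_nodes n_neighbors seed (create_regular_graph n_nodes n_neighbors seed)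

-- ===== LEMMAS AND PROOFS =====

def EVlat (n h : Int) : List (Int × Int) :=
  (PySem.List.pyRange 0 n).flatMap (fun i =>
    (PySem.List.pyRange 1 (h + 1)).flatMap (fun k =>
      [(i, PySem.Int.mod (i + k) n), (PySem.Int.mod (i + k) n, i)]))

def EVodd (n : Int) : List (Int × Int) :=
  (PySem.List.pyRange 0 (PySem.Int.floordiv n 2)).flatMap (fun i =>
    [(i, i + PySem.Int.floordiv n 2), (i + PySem.Int.floordiv n 2, i)])

def evAt (E : List (Int × Int)) (v : Int) : List Int :=
  E.filterMap (fun e => if e.1 = v then some e.2 else none)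

def evStep (g : PySem.Dict Int (PySem.Set Int)) (e : Int × Int) : PySem.Dict Int (PySem.Set Int) :=
  g.modify e.1 PySem.Set.empty (fun s => PySem.Set.add s e.2)

theorem evfold_getD (E : List (Int × Int)) (g : PySem.Dict Int (PySem.Set Int)) (v : Int) :
    (E.foldl evStep g).getD v PySem.Set.empty
      = List.foldl PySem.Set.add (g.getD v PySem.Set.empty) (evAt E v) := by
  unfold evAt
  induction E generalizing g with
  | nil => rfl
  | cons e E ih =>
    simp only [List.foldl_cons, List.filterMap_cons, ih (evStep g e)]
    by_cases h : e.1 = v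
    · simp [h, evStep]
    · simp only [if_neg h]
      have hne : ¬ (v = e.1) := fun hv => h hv.symm
      have : (evStep g e).getD v PySem.Set.empty = g.getD v PySem.Set.empty := by
        simp only [evStep, PySem.Dict.getD_modify, if_neg hne]
      rw [this]

theorem evfold_keys (E : List (Int × Int)) (g : PySem.Dict Int (PySem.Set Int)) :
    (E.foldl evStep g).keys = PySem.Set.update g.keys (E.map (·.1)) := by
  exact PySem.Dict.keys_foldl_modify_key E (·.1) PySem.Set.empty (fun _ e s => PySem.Set.add s e.2) g

theorem update_absorb {s : PySem.Set Int} {xs : List Int} (h : ∀ x ∈ xs, x ∈ s) :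
    PySem.Set.update s xs = s := by
  rw [PySem.Set.update_eq_append_filter]
  have : (PySem.Set.ofList xs).filter (fun y => !(PySem.Set.contains s y)) = [] := by
    rw [List.filter_eq_nil_iff]
    intro a ha
    have hmem : a ∈ s := h a ((PySem.Set.mem_ofList xs a).mp ha)
    simpa using hmem
  rw [this, List.append_nil]

theorem pyRange_map_add (t a b : Int) :
    (PySem.List.pyRange a b).map (fun k => t + k) = PySem.List.pyRange (t + a) (t + b) := by
  suffices hs : ∀ (n : Nat) (a : Int), (b - a).toNat = n →
      (PySem.List.pyRange a b).map (fun k => t + k) = PySem.List.pyRange (t + a) (t + b) from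
    hs (b - a).toNat a rfl
  intro n
  induction n with
  | zero =>
    intro a h
    rw [PySem.List.pyRange_one_eq_nil (by omega), PySem.List.pyRange_one_eq_nil (by omega)]
    rfl
  | succ n ih =>
    intro a h
    rw [PySem.List.pyRange_one_cons (show a < b by omega),
        PySem.List.pyRange_one_cons (show t + a < t + b by omega)]
    simp only [List.map_cons]
    rw [ih (a + 1) (by omega)]
    have e : t + (a + 1) = t + a + 1 := by ring
    rw [e]

theorem mod_char {n : Int} (a : Int) (hn : 0 < n) (h0 : 0 ≤ a) (h2 : a < 2 * n) :
    PySem.Int.mod a n = if a < n then a else a - n := by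
  rw [PySem.Int.mod_eq_emod_of_pos hn]
  split
  · exact Int.emod_eq_of_lt h0 (by omega)
  · have h3 : a % n = (a - n) % n := by
      conv_lhs => rw [show a = (a - n) + n by ring]
      exact Int.emod_eq_add_self_emod.symm
    rw [h3]; exact Int.emod_eq_of_lt (by omega) (by omega)







-- the inner contribution of outer-loop iteration i to node v's list
def Flat (n h v i : Int) : List Int :=
  (PySem.List.pyRange 1 (h + 1)).flatMap (fun k =>
    (if i = v then [PySem.Int.mod (i + k) n] else [])
      ++ (if PySem.Int.mod (i + k) n = v then [i] else []))

theorem evAt_EVlat_flat (n h v : Int) :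
    evAt (EVlat n h) v = (PySem.List.pyRange 0 n).flatMap (Flat n h v) := by
  simp only [evAt, EVlat, List.filterMap_flatMap]
  refine List.flatMap_congr fun i _ => List.flatMap_congr fun k _ => ?_
  simp only [List.filterMap_cons, List.filterMap_nil]
  split_ifs <;> simp

theorem Flat_nil (n h v i : Int) (hn : 0 < n) (hh : 0 ≤ h) (h2 : 2 * h < n)
    (hv0 : 0 ≤ v) (hvn : v < n) (hi0 : 0 ≤ i) (hin : i < n) (hne : i ≠ v)
    (hcond : i < v - h ∨ (v < i ∧ i < n + v - h)) : Flat n h v i = [] := by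
  have : Flat n h v i = (PySem.List.pyRange 1 (h + 1)).flatMap (fun _ => ([] : List Int)) := by
    refine List.flatMap_congr fun k hk => ?_
    have hk' := PySem.List.mem_pyRange_one.mp hk
    rw [if_neg hne, mod_char (i + k) hn (by omega) (by omega)]
    rw [if_neg ?_]
    · rfl
    · split <;> omega
  rw [this]; simp

theorem Flat_single (n h v i : Int) (hn : 0 < n) (hh : 0 ≤ h) (h2 : 2 * h < n)
    (hv0 : 0 ≤ v) (hvn : v < n) (hi0 : 0 ≤ i) (hin : i < n) (hne : i ≠ v)
    (hcond : (v - h ≤ i ∧ i < v) ∨ (n + v - h ≤ i ∧ i < n)) : Flat n h v i = [i] := by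
  have hk0 : ∃ k0, k0 = (if i < v then v - i else n + v - i) := ⟨_, rfl⟩
  obtain ⟨k0, hk0⟩ := hk0
  have hk0b : 1 ≤ k0 ∧ k0 ≤ h := by split at hk0 <;> omega
  unfold Flat
  rw [PySem.List.pyRange_one_append 1 k0 (h + 1) (by omega) (by omega),
      PySem.List.pyRange_one_cons (show k0 < h + 1 by omega), List.flatMap_append, List.flatMap_cons]
  have hside : ∀ k, 1 ≤ k → k < h + 1 → k ≠ k0 →
      ((if i = v then [PySem.Int.mod (i + k) n] else [])
        ++ (if PySem.Int.mod (i + k) n = v then [i] else [])) = [] := by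
    intro k hk1 hk2 hkne
    rw [if_neg hne, mod_char (i + k) hn (by omega) (by omega), if_neg ?_]
    · rfl
    · split at hk0 <;> (split <;> omega)
  have hL : (PySem.List.pyRange 1 k0).flatMap (fun k =>
      (if i = v then [PySem.Int.mod (i + k) n] else [])
        ++ (if PySem.Int.mod (i + k) n = v then [i] else [])) = [] := by
    have : (PySem.List.pyRange 1 k0).flatMap (fun k =>
        (if i = v then [PySem.Int.mod (i + k) n] else [])
          ++ (if PySem.Int.mod (i + k) n = v then [i] else []))
        = (PySem.List.pyRange 1 k0).flatMap (fun _ => ([] : List Int)) := by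
      refine List.flatMap_congr fun k hk => ?_
      have hk' := PySem.List.mem_pyRange_one.mp hk
      exact hside k (by omega) (by omega) (by omega)
    rw [this]; simp
  have hR : (PySem.List.pyRange (k0 + 1) (h + 1)).flatMap (fun k =>
      (if i = v then [PySem.Int.mod (i + k) n] else [])
        ++ (if PySem.Int.mod (i + k) n = v then [i] else [])) = [] := by
    have : (PySem.List.pyRange (k0 + 1) (h + 1)).flatMap (fun k =>
        (if i = v then [PySem.Int.mod (i + k) n] else [])
          ++ (if PySem.Int.mod (i + k) n = v then [i] else []))
        = (PySem.List.pyRange (k0 + 1) (h + 1)).flatMap (fun _ => ([] : List Int)) := by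
      refine List.flatMap_congr fun k hk => ?_
      have hk' := PySem.List.mem_pyRange_one.mp hk
      exact hside k (by omega) (by omega) (by omega)
    rw [this]; simp
  rw [hL, hR]
  rw [if_neg hne, mod_char (i + k0) hn (by omega) (by omega), if_pos ?_]
  · simp
  · split at hk0 <;> (split <;> omega)

theorem Flat_self (n h v : Int) (hn : 0 < n) (hh : 0 ≤ h) (h2 : 2 * h < n)
    (hv0 : 0 ≤ v) (hvn : v < n) :
    Flat n h v v = PySem.List.pyRange (v + 1) (min (v + h + 1) n)
      ++ PySem.List.pyRange 0 (v + h + 1 - n) := by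
  unfold Flat
  have hmap : ∀ l : List Int, (∀ k ∈ l, 1 ≤ k ∧ k ≤ h) →
      l.flatMap (fun k =>
        (if v = v then [PySem.Int.mod (v + k) n] else [])
          ++ (if PySem.Int.mod (v + k) n = v then [v] else []))
      = l.map (fun k => PySem.Int.mod (v + k) n) := by
    intro l hl
    rw [← List.flatMap_singleton' (l.map (fun k => PySem.Int.mod (v + k) n)), List.flatMap_map]
    refine List.flatMap_congr fun k hk => ?_
    have hk' := hl k hk
    rw [if_pos rfl, mod_char (v + k) hn (by omega) (by omega)]
    have hne2 : ¬ ((if v + k < n then v + k else v + k - n) = v) := by split <;> omega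
    rw [if_neg hne2]; simp
  set c := min (h + 1) (n - v) with hc
  rw [PySem.List.pyRange_one_append 1 c (h + 1) (by omega) (by omega), List.flatMap_append]
  rw [hmap _ (fun k hk => by have := PySem.List.mem_pyRange_one.mp hk; omega),
      hmap _ (fun k hk => by have := PySem.List.mem_pyRange_one.mp hk; omega)]
  have e1 : (PySem.List.pyRange 1 c).map (fun k => PySem.Int.mod (v + k) n)
      = PySem.List.pyRange (v + 1) (min (v + h + 1) n) := by
    have : (PySem.List.pyRange 1 c).map (fun k => PySem.Int.mod (v + k) n)
        = (PySem.List.pyRange 1 c).map (fun k => v + k) := by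
      refine List.map_congr_left fun k hk => ?_
      have hk' := PySem.List.mem_pyRange_one.mp hk
      rw [mod_char (v + k) hn (by omega) (by omega)]
      split <;> omega
    rw [this, pyRange_map_add v 1 c]
    congr 1 <;> omega
  have e2 : (PySem.List.pyRange c (h + 1)).map (fun k => PySem.Int.mod (v + k) n)
      = PySem.List.pyRange 0 (v + h + 1 - n) := by
    have : (PySem.List.pyRange c (h + 1)).map (fun k => PySem.Int.mod (v + k) n)
        = (PySem.List.pyRange c (h + 1)).map (fun k => (v - n) + k) := by
      refine List.map_congr_left fun k hk => ?_
      have hk' := PySem.List.mem_pyRange_one.mp hk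
      rw [mod_char (v + k) hn (by omega) (by omega)]
      split <;> omega
    rw [this, pyRange_map_add (v - n) c (h + 1)]
    by_cases hcase : n - v ≤ h + 1
    · congr 1 <;> omega
    · rw [PySem.List.pyRange_one_eq_nil (by omega), PySem.List.pyRange_one_eq_nil (by omega)]
  rw [e1, e2]

def Lv (n h v : Int) : List Int :=
  PySem.List.pyRange (max 0 (v - h)) v
  ++ PySem.List.pyRange (v + 1) (min (v + h + 1) n)
  ++ PySem.List.pyRange 0 (v + h + 1 - n)
  ++ PySem.List.pyRange (n + v - h) n

theorem evAt_EVlat (n h v : Int) (hn : 0 < n) (h2 : 2 * h < n)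
    (hv0 : 0 ≤ v) (hvn : v < n) :
    evAt (EVlat n h) v = Lv n h v := by
  unfold Lv
  by_cases hh : h < 0
  · -- no lattice neighbors at all
    have hkr : PySem.List.pyRange 1 (h + 1) = [] := PySem.List.pyRange_one_eq_nil (by omega)
    rw [evAt_EVlat_flat]
    have : (PySem.List.pyRange 0 n).flatMap (Flat n h v)
        = (PySem.List.pyRange 0 n).flatMap (fun _ => ([] : List Int)) := by
      refine List.flatMap_congr fun i _ => ?_
      unfold Flat; rw [hkr]; rfl
    rw [this]
    rw [PySem.List.pyRange_one_eq_nil (show v ≤ max 0 (v - h) by omega),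
        PySem.List.pyRange_one_eq_nil (show min (v + h + 1) n ≤ v + 1 by omega),
        PySem.List.pyRange_one_eq_nil (show v + h + 1 - n ≤ 0 by omega),
        PySem.List.pyRange_one_eq_nil (show n ≤ n + v - h by omega)]
    simp
  · have hh : 0 ≤ h := by omega
    rw [evAt_EVlat_flat]
    set a := max 0 (v - h) with ha
    set w := min (n + v - h) n with hw
    rw [show PySem.List.pyRange 0 n
          = PySem.List.pyRange 0 a ++ PySem.List.pyRange a v ++ PySem.List.pyRange v (v + 1)
            ++ PySem.List.pyRange (v + 1) w ++ PySem.List.pyRange w n from ?_]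
    · simp only [List.flatMap_append]
      have C0 : (PySem.List.pyRange 0 a).flatMap (Flat n h v) = [] := by
        have : (PySem.List.pyRange 0 a).flatMap (Flat n h v)
            = (PySem.List.pyRange 0 a).flatMap (fun _ => ([] : List Int)) := by
          refine List.flatMap_congr fun i hi => ?_
          have hi' := PySem.List.mem_pyRange_one.mp hi
          exact Flat_nil n h v i hn hh h2 hv0 hvn (by omega) (by omega) (by omega) (by omega)
        rw [this]; simp
      have C1 : (PySem.List.pyRange a v).flatMap (Flat n h v) = PySem.List.pyRange a v := by
        have : (PySem.List.pyRange a v).flatMap (Flat n h v)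
            = (PySem.List.pyRange a v).flatMap (fun i => [i]) := by
          refine List.flatMap_congr fun i hi => ?_
          have hi' := PySem.List.mem_pyRange_one.mp hi
          exact Flat_single n h v i hn hh h2 hv0 hvn (by omega) (by omega) (by omega) (by omega)
        rw [this, List.flatMap_singleton']
      have C2 : (PySem.List.pyRange v (v + 1)).flatMap (Flat n h v)
          = PySem.List.pyRange (v + 1) (min (v + h + 1) n) ++ PySem.List.pyRange 0 (v + h + 1 - n) := by
        rw [PySem.List.pyRange_one_cons (by omega), PySem.List.pyRange_one_eq_nil (le_refl (v + 1)),
            List.flatMap_cons, List.flatMap_nil, List.append_nil]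
        exact Flat_self n h v hn hh h2 hv0 hvn
      have C3 : (PySem.List.pyRange (v + 1) w).flatMap (Flat n h v) = [] := by
        have : (PySem.List.pyRange (v + 1) w).flatMap (Flat n h v)
            = (PySem.List.pyRange (v + 1) w).flatMap (fun _ => ([] : List Int)) := by
          refine List.flatMap_congr fun i hi => ?_
          have hi' := PySem.List.mem_pyRange_one.mp hi
          exact Flat_nil n h v i hn hh h2 hv0 hvn (by omega) (by omega) (by omega) (by omega)
        rw [this]; simp
      have C4 : (PySem.List.pyRange w n).flatMap (Flat n h v) = PySem.List.pyRange (n + v - h) n := by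
        have : (PySem.List.pyRange w n).flatMap (Flat n h v)
            = (PySem.List.pyRange w n).flatMap (fun i => [i]) := by
          refine List.flatMap_congr fun i hi => ?_
          have hi' := PySem.List.mem_pyRange_one.mp hi
          exact Flat_single n h v i hn hh h2 hv0 hvn (by omega) (by omega) (by omega) (by omega)
        rw [this, List.flatMap_singleton']
        by_cases hcase : n + v - h ≤ n
        · rw [show w = n + v - h by omega]
        · rw [PySem.List.pyRange_one_eq_nil (show n ≤ w by omega),
              PySem.List.pyRange_one_eq_nil (show n ≤ n + v - h by omega)]
      rw [C0, C1, C2, C3, C4]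
      simp
    · rw [← PySem.List.pyRange_one_append 0 a v (by omega) (by omega)]
      rw [← PySem.List.pyRange_one_append 0 v (v + 1) (by omega) (by omega)]
      rw [← PySem.List.pyRange_one_append 0 (v + 1) w (by omega) (by omega)]
      rw [← PySem.List.pyRange_one_append 0 w n (by omega) (by omega)]

theorem evAt_EVodd (n v : Int) (hn : 0 < n) (hev : PySem.Int.mod n 2 = 0)
    (hv0 : 0 ≤ v) (hvn : v < n) :
    evAt (EVodd n) v = [PySem.Int.mod (v + PySem.Int.floordiv n 2) n] := by
  have hpair : evAt (EVodd n) v = (PySem.List.pyRange 0 (PySem.Int.floordiv n 2)).flatMap (fun i =>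
      (if i = v then [i + PySem.Int.floordiv n 2] else [])
        ++ (if i + PySem.Int.floordiv n 2 = v then [i] else [])) := by
    simp only [evAt, EVodd, List.filterMap_flatMap]
    refine List.flatMap_congr fun i _ => ?_
    simp only [List.filterMap_cons, List.filterMap_nil]
    split_ifs <;> simp
  have hM : PySem.Int.floordiv n 2 * 2 + PySem.Int.mod n 2 = n := PySem.Int.floordiv_mul_add_mod n 2
  set M := PySem.Int.floordiv n 2 with hMdef
  have hn2 : n = 2 * M := by omega
  have hM0 : 0 < M := by omega
  rw [hpair]
  have hi0 : ∃ i0, i0 = (if v < M then v else v - M) := ⟨_, rfl⟩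
  obtain ⟨i0, hi0⟩ := hi0
  have hi0b : 0 ≤ i0 ∧ i0 < M := by split at hi0 <;> omega
  rw [show PySem.List.pyRange 0 M
        = PySem.List.pyRange 0 i0 ++ PySem.List.pyRange i0 (i0 + 1) ++ PySem.List.pyRange (i0 + 1) M from by
      rw [← PySem.List.pyRange_one_append 0 i0 (i0 + 1) (by omega) (by omega),
          ← PySem.List.pyRange_one_append 0 (i0 + 1) M (by omega) (by omega)]]
  simp only [List.flatMap_append]
  have hside : ∀ i, 0 ≤ i → i < M → i ≠ i0 →
      ((if i = v then [i + M] else []) ++ (if i + M = v then [i] else [])) = ([] : List Int) := by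
    intro i hi1 hi2 hine
    rw [if_neg (by split at hi0 <;> omega), if_neg (by split at hi0 <;> omega)]
    rfl
  have hL : (PySem.List.pyRange 0 i0).flatMap (fun i =>
      (if i = v then [i + M] else []) ++ (if i + M = v then [i] else [])) = [] := by
    rw [show (PySem.List.pyRange 0 i0).flatMap (fun i =>
        (if i = v then [i + M] else []) ++ (if i + M = v then [i] else []))
        = (PySem.List.pyRange 0 i0).flatMap (fun _ => ([] : List Int)) from
      List.flatMap_congr fun i hi => by
        have hi' := PySem.List.mem_pyRange_one.mp hi
        exact hside i (by omega) (by omega) (by omega)]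
    simp
  have hR : (PySem.List.pyRange (i0 + 1) M).flatMap (fun i =>
      (if i = v then [i + M] else []) ++ (if i + M = v then [i] else [])) = [] := by
    rw [show (PySem.List.pyRange (i0 + 1) M).flatMap (fun i =>
        (if i = v then [i + M] else []) ++ (if i + M = v then [i] else []))
        = (PySem.List.pyRange (i0 + 1) M).flatMap (fun _ => ([] : List Int)) from
      List.flatMap_congr fun i hi => by
        have hi' := PySem.List.mem_pyRange_one.mp hi
        exact hside i (by omega) (by omega) (by omega)]
    simp
  rw [hL, hR, PySem.List.pyRange_one_cons (show i0 < i0 + 1 by omega),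
      PySem.List.pyRange_one_eq_nil (le_refl (i0 + 1))]
  simp only [List.flatMap_cons, List.flatMap_nil, List.append_nil, List.nil_append]
  rw [mod_char (v + M) hn (by omega) (by omega)]
  by_cases hvM : v < M
  · rw [if_pos (show i0 = v by omega), if_neg (show ¬ i0 + M = v by omega),
        if_pos (show v + M < n by omega)]
    have : i0 = v := by omega
    rw [this]; simp
  · rw [if_neg (show ¬ i0 = v by omega), if_pos (show i0 + M = v by omega),
        if_neg (show ¬ v + M < n by omega)]
    have : i0 = v + M - n := by omega
    rw [this]; simp

theorem b_items (l : List Int) (f : Int → PySem.Set Int) (hnd : l.Nodup) :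
    (l.foldl (fun d i => d.insert i (f i)) (PySem.Dict.empty : PySem.Dict Int (PySem.Set Int))).items
      = l.map (fun i => (i, f i)) := by
  have h := PySem.Dict.items_foldl_insert_fresh l (fun i => i) f PySem.Dict.empty
    (fun a _ => PySem.Dict.contains_empty a) (by simpa using hnd)
  simpa using h

theorem Lv_nodup (n h v : Int) (hn : 0 < n) (h2 : 2 * h < n) : (Lv n h v).Nodup := by
  simp only [Lv, List.nodup_append, PySem.List.nodup_pyRange_one, true_and,
    List.mem_append, PySem.List.mem_pyRange_one]
  and_intros <;> (intros; omega)

theorem not_mem_Lv_odd (n h v M : Int) (hn : 0 < n) (h2 : 2 * h < n) (hn2 : n = 2 * M)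
    (hv0 : 0 ≤ v) (hvn : v < n) : PySem.Int.mod (v + M) n ∉ Lv n h v := by
  rw [mod_char (v + M) hn (by omega) (by omega)]
  simp only [Lv, List.mem_append, PySem.List.mem_pyRange_one]
  intro hmem
  split at hmem <;> omega

theorem g0_getD (l : List Int) (d : PySem.Dict Int (PySem.Set Int)) (v : Int)
    (hd : d.getD v PySem.Set.empty = PySem.Set.empty) :
    (l.foldl (fun d i => d.insert i PySem.Set.empty) d).getD v PySem.Set.empty
      = PySem.Set.empty := by
  induction l generalizing d with
  | nil => exact hd
  | cons a l ih =>
    simp only [List.foldl_cons]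
    refine ih _ ?_
    rw [PySem.Dict.getD_insert]
    split
    · rfl
    · exact hd

theorem g0_keys (l : List Int) :
    (l.foldl (fun d i => d.insert i (PySem.Set.empty : PySem.Set Int))
        (PySem.Dict.empty : PySem.Dict Int (PySem.Set Int))).keys
      = PySem.Set.ofList l := by
  have h := PySem.Dict.keys_foldl_insert l (fun _ _ => (PySem.Set.empty : PySem.Set Int))
    (PySem.Dict.empty : PySem.Dict Int (PySem.Set Int))
  rw [h, PySem.Dict.keys_empty, PySem.Set.update_nil_left]

theorem alat_fold (n h : Int) (g : PySem.Dict Int (PySem.Set Int)) :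
    (PySem.List.pyRange 0 n).foldl (fun g i =>
      (PySem.List.pyRange 1 (h + 1)).foldl (fun g k =>
        ((g.modify i PySem.Set.empty fun s => s.add (PySem.Int.mod (i + k) n)).modify
          (PySem.Int.mod (i + k) n) PySem.Set.empty fun s => s.add i)) g) g
    = (EVlat n h).foldl evStep g := by
  simp only [EVlat, List.foldl_flatMap, List.foldl_cons, List.foldl_nil]
  rfl

theorem aodd_fold (n : Int) (g : PySem.Dict Int (PySem.Set Int)) :
    (PySem.List.pyRange 0 (PySem.Int.floordiv n 2)).foldl (fun g i =>
      ((g.modify i PySem.Set.empty fun s => s.add (i + PySem.Int.floordiv n 2)).modify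
        (i + PySem.Int.floordiv n 2) PySem.Set.empty fun s => s.add i)) g
    = (EVodd n).foldl evStep g := by
  simp only [EVodd, List.foldl_flatMap, List.foldl_cons, List.foldl_nil]
  rfl

theorem EVlat_targets (n h : Int) (hn : 0 < n) :
    ∀ x ∈ (EVlat n h).map (·.1), x ∈ PySem.List.pyRange 0 n := by
  intro x hx
  simp only [EVlat, List.map_flatMap, List.mem_flatMap, List.map_cons, List.map_nil,
    List.mem_cons, List.not_mem_nil, or_false] at hx
  obtain ⟨i, hi, k, hk, hcase⟩ := hx
  have hi' := PySem.List.mem_pyRange_one.mp hi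
  have hmod1 := PySem.Int.mod_nonneg (i + k) hn
  have hmod2 := PySem.Int.mod_lt (i + k) hn
  rw [PySem.List.mem_pyRange_one]
  rcases hcase with h | h <;> (rw [h]; omega)

theorem EVodd_targets (n : Int) (hn : 0 < n) :
    ∀ x ∈ (EVodd n).map (·.1), x ∈ PySem.List.pyRange 0 n := by
  intro x hx
  simp only [EVodd, List.map_flatMap, List.mem_flatMap, List.map_cons, List.map_nil,
    List.mem_cons, List.not_mem_nil, or_false] at hx
  obtain ⟨i, hi, hcase⟩ := hx
  have hi' := PySem.List.mem_pyRange_one.mp hi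
  have hM := PySem.Int.floordiv_mul_add_mod n 2
  have hMn := PySem.Int.mod_nonneg n (by omega : (0:Int) < 2)
  have hMl := PySem.Int.mod_lt n (by omega : (0:Int) < 2)
  rw [PySem.List.mem_pyRange_one]
  rcases hcase with h | h <;> (rw [h]; omega)


-- ===== VERDICT (by name: the statement is the Claim_ definition above) =====
theorem create_regular_graph_spec : Claim_equal_create_regular_graph := by
  intro n m seed _ hpre
  obtain ⟨hlt, heven⟩ := hpre
  unfold Spec_create_regular_graph create_regular_graph create_regular_graph_alt
  rw [if_neg (not_le.mpr hlt), if_neg (show ¬ PySem.Int.mod (n * m) 2 ≠ 0 from not_not.mpr heven),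
      if_neg (not_le.mpr hlt), if_neg (show ¬ PySem.Int.mod (n * m) 2 ≠ 0 from not_not.mpr heven)]
  dsimp only
  by_cases hn : 0 < n
  · have hdm := PySem.Int.floordiv_mul_add_mod m 2
    have hdm0 := PySem.Int.mod_nonneg m (by omega : (0:Int) < 2)
    have hdm1 := PySem.Int.mod_lt m (by omega : (0:Int) < 2)
    set h := PySem.Int.floordiv m 2 with hhdef
    have h2 : 2 * h < n := by omega
    have hnodupR : (PySem.List.pyRange 0 n).Nodup := PySem.List.nodup_pyRange_one 0 n
    rw [alat_fold n h]
    have hkeys0 : ((PySem.List.pyRange 0 n).foldl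
        (fun d i => d.insert i (PySem.Set.empty : PySem.Set Int)) PySem.Dict.empty).keys
        = PySem.List.pyRange 0 n :=
      (g0_keys _).trans (PySem.Set.ofList_eq_self_of_nodup _ hnodupR)
    have hgetD0 : ∀ v, ((PySem.List.pyRange 0 n).foldl
        (fun d i => d.insert i (PySem.Set.empty : PySem.Set Int)) PySem.Dict.empty).getD v PySem.Set.empty
        = PySem.Set.empty :=
      fun v => g0_getD _ _ v (PySem.Dict.getD_empty v PySem.Set.empty)
    have hkeys1 : (((EVlat n h).foldl evStep ((PySem.List.pyRange 0 n).foldl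
        (fun d i => d.insert i (PySem.Set.empty : PySem.Set Int)) PySem.Dict.empty))).keys
        = PySem.List.pyRange 0 n := by
      rw [evfold_keys, hkeys0, update_absorb (EVlat_targets n h hn)]
    by_cases hodd : PySem.Int.mod m 2 ≠ 0
    · -- odd degree: the diametric pass runs; n is even
      rw [if_pos hodd, aodd_fold n]
      simp only [if_pos hodd]
      set G0 := (PySem.List.pyRange 0 n).foldl
        (fun d i => d.insert i (PySem.Set.empty : PySem.Set Int)) PySem.Dict.empty with hG0
      set G1 := (EVlat n h).foldl evStep G0 with hG1
      set G2 := (EVodd n).foldl evStep G1 with hG2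
      have hdvd : (2 : Int) ∣ n := by
        rcases (Int.prime_two.dvd_mul).mp
          ((PySem.Int.mod_eq_zero_iff_dvd (n * m) 2).mp heven) with hd | hd
        · exact hd
        · exact absurd ((PySem.Int.mod_eq_zero_iff_dvd m 2).mpr hd) hodd
      have hneven : PySem.Int.mod n 2 = 0 := (PySem.Int.mod_eq_zero_iff_dvd n 2).mpr hdvd
      have hdn := PySem.Int.floordiv_mul_add_mod n 2
      have hn2 : n = 2 * PySem.Int.floordiv n 2 := by omega
      have hkeys2 : G2.keys = PySem.List.pyRange 0 n := by
        rw [hG2, evfold_keys, hkeys1, update_absorb (EVodd_targets n hn)]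
      rw [PySem.Dict.items_eq_map_keys G2 (by rw [hkeys2]; exact hnodupR) PySem.Set.empty, hkeys2]
      rw [b_items _ _ hnodupR]
      refine List.map_congr_left fun v hv => ?_
      have hv' := PySem.List.mem_pyRange_one.mp hv
      simp only [Prod.mk.injEq, true_and]
      have hnotmem := not_mem_Lv_odd n h v (PySem.Int.floordiv n 2) hn h2 hn2 hv'.1 hv'.2
      have hndfull : (Lv n h v ++ [PySem.Int.mod (v + PySem.Int.floordiv n 2) n]).Nodup := by
        rw [List.nodup_append]
        refine ⟨Lv_nodup n h v hn h2, List.nodup_singleton _, fun a ha b hb => ?_⟩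
        rw [List.mem_singleton] at hb
        subst hb
        exact fun hEq => hnotmem (hEq ▸ ha)
      rw [hG2, evfold_getD, hG1, evfold_getD, hgetD0 v, ← List.foldl_append,
          evAt_EVlat n h v hn h2 hv'.1 hv'.2, evAt_EVodd n v hn hneven hv'.1 hv'.2,
          show (PySem.Set.empty : PySem.Set Int) = [] from rfl, ← PySem.Set.ofList_eq_foldl,
          show Lv n h v ++ [PySem.Int.mod (v + PySem.Int.floordiv n 2) n]
              = Lv n h v ++ [PySem.Int.mod (v + PySem.Int.floordiv n 2) n] from rfl,
          PySem.Set.ofList_append_singleton,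
          PySem.Set.ofList_eq_self_of_nodup _ (Lv_nodup n h v hn h2)]
      congr 1
      exact (PySem.Set.ofList_eq_self_of_nodup _ (Lv_nodup n h v hn h2)).symm
    · rw [if_neg hodd]
      simp only [if_neg hodd]
      set G0 := (PySem.List.pyRange 0 n).foldl
        (fun d i => d.insert i (PySem.Set.empty : PySem.Set Int)) PySem.Dict.empty with hG0
      set G1 := (EVlat n h).foldl evStep G0 with hG1
      rw [PySem.Dict.items_eq_map_keys G1 (by rw [hkeys1]; exact hnodupR) PySem.Set.empty, hkeys1]
      rw [b_items _ _ hnodupR]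
      refine List.map_congr_left fun v hv => ?_
      have hv' := PySem.List.mem_pyRange_one.mp hv
      simp only [Prod.mk.injEq, true_and]
      rw [hG1, evfold_getD, hgetD0 v, evAt_EVlat n h v hn h2 hv'.1 hv'.2,
          show (PySem.Set.empty : PySem.Set Int) = [] from rfl, ← PySem.Set.ofList_eq_foldl]
      rfl
  · -- n ≤ 0: both graphs are empty
    have hfd : PySem.Int.floordiv n 2 ≤ 0 := by
      have := PySem.Int.floordiv_mul_add_mod n 2
      have := PySem.Int.mod_nonneg n (by omega : (0:Int) < 2)
      omega
    rw [PySem.List.pyRange_one_eq_nil (show n ≤ 0 by omega),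
        PySem.List.pyRange_one_eq_nil hfd]
    simp only [List.foldl_nil, ite_self]
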